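-- pv_equiv track=rewrite | github.com/hawi3075/CSEC_CPD2 | Sereja and Dima.py | sereja_and_dima
-- ===== SOURCE A (Python) =====
-- def sereja_and_dima(cards):
--     sereja_score = 0
--     dima_score = 0
--     turn = 0
--
--     while cards:
--         if cards[0] > cards[-1]:
--             chosen_card = cards.pop(0)
--         else:
--             chosen_card = cards.pop()
--
--         if turn == 0:
--             sereja_score += chosen_card
--         else:
--             dima_score += chosen_card
--
--         turn = 1 - turn
--
--     return sereja_score, dima_score
-- ===== SOURCE B (Python) =====
-- def sereja_and_dima(cards):
--     # Two pointers over the fixed list: no pop(0), O(n). Does not mutate cards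
--     # (A empties the list in place; the equivalence is about the return value).
--     s0 = 0
--     s1 = 0
--     lo, hi = 0, len(cards) - 1
--     turn = 0
--     while lo <= hi:
--         if cards[lo] > cards[hi]:
--             chosen = cards[lo]
--             lo += 1
--         else:
--             chosen = cards[hi]
--             hi -= 1
--         if turn == 0:
--             s0 += chosen
--         else:
--             s1 += chosen
--         turn = 1 - turn
--     return s0, s1
-- ===== Notes on version B (the rewrite author's own statement) =====
-- stated objective: faster
-- what changed: Replaces A's destructive list popping (pop(0) shifts the whole list) with two index pointers walking inward over the unchanged list; B also leaves the input list intact where A empties it.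
import Mathlib
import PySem

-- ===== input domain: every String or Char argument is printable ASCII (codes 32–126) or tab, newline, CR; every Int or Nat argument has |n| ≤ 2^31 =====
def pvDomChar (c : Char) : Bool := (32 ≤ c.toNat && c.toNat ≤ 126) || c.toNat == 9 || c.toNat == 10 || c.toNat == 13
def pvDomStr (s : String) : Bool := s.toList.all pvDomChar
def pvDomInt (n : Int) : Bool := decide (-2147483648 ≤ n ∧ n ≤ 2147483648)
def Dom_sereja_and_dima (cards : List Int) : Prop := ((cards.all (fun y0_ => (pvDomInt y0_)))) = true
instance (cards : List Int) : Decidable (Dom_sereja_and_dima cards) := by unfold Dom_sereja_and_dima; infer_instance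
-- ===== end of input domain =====

-- B replaces A's destructive popping (pop(0) is O(n)) with two index pointers over the
-- unchanged list: O(n) instead of O(n^2). A empties the caller's list in place, B does not
-- mutate it; the equivalence proved here is about the return value only.

-- ===== PORT A =====
-- A's while loop: pop the larger end of the shrinking list, add to the player on turn.
def sereja_and_dima_go (cards : List Int) (s d turn : Int) : Int × Int :=
  match cards with
  | [] => (s, d)
  | x :: rest =>
    let lastv := (x :: rest).getLast (by simp)
    if x > lastv then
      if turn == 0 then sereja_and_dima_go rest (s + x) d (1 - turn)
      else sereja_and_dima_go rest s (d + x) (1 - turn)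
    else
      if turn == 0 then sereja_and_dima_go ((x :: rest).dropLast) (s + lastv) d (1 - turn)
      else sereja_and_dima_go ((x :: rest).dropLast) s (d + lastv) (1 - turn)
termination_by cards.length
decreasing_by all_goals simp

def sereja_and_dima (cards : List Int) : Int × Int :=
  sereja_and_dima_go cards 0 0 0

-- ===== PORT B =====
-- B's while loop: lo/hi pointers into the fixed list (indices are always in range).
def sereja_and_dima_alt_go (cards : List Int) (lo hi s0 s1 turn : Int) : Int × Int :=
  if _h : lo ≤ hi then
    let a := (PySem.List.pyGet? cards lo).getD 0
    let b := (PySem.List.pyGet? cards hi).getD 0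
    if a > b then
      if turn == 0 then sereja_and_dima_alt_go cards (lo + 1) hi (s0 + a) s1 (1 - turn)
      else sereja_and_dima_alt_go cards (lo + 1) hi s0 (s1 + a) (1 - turn)
    else
      if turn == 0 then sereja_and_dima_alt_go cards lo (hi - 1) (s0 + b) s1 (1 - turn)
      else sereja_and_dima_alt_go cards lo (hi - 1) s0 (s1 + b) (1 - turn)
  else (s0, s1)
termination_by (hi + 1 - lo).toNat
decreasing_by all_goals omega

def sereja_and_dima_alt (cards : List Int) : Int × Int :=
  sereja_and_dima_alt_go cards 0 (cards.length - 1) 0 0 0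

-- ===== PRECONDITION & SPEC =====
def Spec_sereja_and_dima (cards : List Int) (out : Int × Int) : Prop := out = sereja_and_dima_alt cards
instance (cards : List Int) (out : Int × Int) : Decidable (Spec_sereja_and_dima cards out) := by unfold Spec_sereja_and_dima; infer_instance

-- ===== CLAIM (what is proved, stated in full; the proofs are below) =====
def Claim_equal_sereja_and_dima : Prop := ∀ (cards : List Int), Dom_sereja_and_dima cards → Spec_sereja_and_dima cards (sereja_and_dima cards)

-- ===== LEMMAS AND PROOFS =====

-- The segment cards[lo..hi] that B's pointers delimit is exactly the list A is still holding.
theorem bridge_go (n : Nat) : ∀ (cards : List Int) (lo hi s d turn : Int),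
    0 ≤ lo → hi < (cards.length : Int) → (hi + 1 - lo).toNat = n →
    sereja_and_dima_go ((cards.drop lo.toNat).take n) s d turn
      = sereja_and_dima_alt_go cards lo hi s d turn := by
  induction n with
  | zero =>
    intro cards lo hi s d turn hlo hhi hn
    have : ¬ lo ≤ hi := by omega
    rw [sereja_and_dima_alt_go]
    simp [this, sereja_and_dima_go]
  | succ m ih =>
    intro cards lo hi s d turn hlo hhi hn
    have hle : lo ≤ hi := by omega
    have hlolen : lo.toNat < cards.length := by omega
    have hhilen : hi.toNat < cards.length := by omega
    have hhieq : lo.toNat + m = hi.toNat := by omega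
    -- decompose the segment
    have hdropc : cards.drop lo.toNat = cards[lo.toNat] :: cards.drop (lo.toNat + 1) :=
      List.drop_eq_getElem_cons hlolen
    set seg : List Int := (cards.drop lo.toNat).take (m + 1) with hseg
    have hsegc : seg = cards[lo.toNat] :: (cards.drop (lo.toNat + 1)).take m := by
      rw [hseg, hdropc, List.take_succ_cons]
    have hseglen : seg.length = m + 1 := by
      rw [hseg]; simp; omega
    have hlast : seg.getLast (by rw [hsegc]; simp) = cards[hi.toNat] := by
      rw [List.getLast_eq_getElem]
      simp only [hseg, List.getElem_take, List.getElem_drop, List.length_take, List.length_drop]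
      congr 1
      omega
    have hdrop : seg.dropLast = (cards.drop lo.toNat).take m := by
      rw [List.dropLast_eq_take, hseglen, hseg, List.take_take]
      congr 1
      omega
    -- pyGet? values
    have hga : (PySem.List.pyGet? cards lo).getD 0 = cards[lo.toNat] := by
      rw [PySem.List.pyGet?_of_nonneg cards hlo]
      simp [List.getElem?_eq_getElem hlolen]
    have hgb : (PySem.List.pyGet? cards hi).getD 0 = cards[hi.toNat] := by
      rw [PySem.List.pyGet?_of_nonneg cards (by omega : (0:Int) ≤ hi)]
      simp [List.getElem?_eq_getElem hhilen]
    -- unfold both sides one step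
    rw [sereja_and_dima_alt_go]
    simp only [hle, dite_true, hga, hgb]
    conv_lhs => rw [hsegc]
    rw [sereja_and_dima_go]
    have hlastq : seg.getLast? = some cards[hi.toNat] := by
      rw [List.getLast?_eq_some_getLast (by rw [hsegc]; simp)]
      exact congrArg some hlast
    have hlast' : ((cards[lo.toNat] :: (cards.drop (lo.toNat + 1)).take m)).getLast (by simp)
        = cards[hi.toNat] := by
      apply Option.some.inj
      rw [← List.getLast?_eq_some_getLast (by simp), ← hsegc]
      exact hlastq
    simp only [hlast']
    by_cases hcmp : cards[lo.toNat] > cards[hi.toNat]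
    · rw [if_pos hcmp, if_pos hcmp]
      have htail : (cards.drop (lo.toNat + 1)).take m = (cards.drop (lo + 1).toNat).take m := by
        congr 2; omega
      by_cases ht : turn = 0
      · have ht' : (turn == 0) = true := by simpa using ht
        rw [if_pos ht', if_pos ht', htail]
        exact ih cards (lo + 1) hi (s + cards[lo.toNat]) d (1 - turn) (by omega) hhi (by omega)
      · have ht' : ¬ ((turn == 0) = true) := by simpa using ht
        rw [if_neg ht', if_neg ht', htail]
        exact ih cards (lo + 1) hi s (d + cards[lo.toNat]) (1 - turn) (by omega) hhi (by omega)
    · rw [if_neg hcmp, if_neg hcmp]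
      have hdl : (cards[lo.toNat] :: (cards.drop (lo.toNat + 1)).take m).dropLast
          = (cards.drop lo.toNat).take m := by rw [← hsegc]; exact hdrop
      rw [hdl]
      by_cases ht : turn = 0
      · have ht' : (turn == 0) = true := by simpa using ht
        rw [if_pos ht', if_pos ht']
        exact ih cards lo (hi - 1) (s + cards[hi.toNat]) d (1 - turn) hlo (by omega) (by omega)
      · have ht' : ¬ ((turn == 0) = true) := by simpa using ht
        rw [if_neg ht', if_neg ht']
        exact ih cards lo (hi - 1) s (d + cards[hi.toNat]) (1 - turn) hlo (by omega) (by omega)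

-- ===== VERDICT (by name: the statement is the Claim_ definition above) =====
theorem sereja_and_dima_spec : Claim_equal_sereja_and_dima := by
  intro cards _
  unfold Spec_sereja_and_dima sereja_and_dima sereja_and_dima_alt
  have h := bridge_go cards.length cards 0 ((cards.length : Int) - 1) 0 0 0
    (by omega) (by omega) (by omega)
  simpa using h
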